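-- pv_equiv track=rewrite | github.com/AndrewPaglusch/SimpleServerBackup | lib/Parseconfig.py | sort_files
-- ===== SOURCE A (Python) =====
-- def sort_files(files):
--     pre = []
--     post = []
--     [ pre.append(file) for file in files if file.startswith('pre') ]
--     [ post.append(file) for file in files if file.startswith('post') ]
--     pre.sort()
--     post.sort()
--     return pre, post
-- ===== SOURCE B (Python) =====
-- def sort_files(files):
--     pre = []
--     post = []
--     for f in sorted(files):
--         if f.startswith('pre'):
--             pre.append(f)
--         elif f.startswith('post'):
--             post.append(f)
--     return pre, post
-- ===== Notes on version B (the rewrite author's own statement) =====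
-- stated objective: alternative
-- what changed: A partitions the list twice (one comprehension per bucket) and sorts each bucket; B sorts once and makes a single if/elif pass distributing each item into its bucket, relying on sort stability and the mutual exclusivity of the 'pre'/'post' prefixes.
import Mathlib
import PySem

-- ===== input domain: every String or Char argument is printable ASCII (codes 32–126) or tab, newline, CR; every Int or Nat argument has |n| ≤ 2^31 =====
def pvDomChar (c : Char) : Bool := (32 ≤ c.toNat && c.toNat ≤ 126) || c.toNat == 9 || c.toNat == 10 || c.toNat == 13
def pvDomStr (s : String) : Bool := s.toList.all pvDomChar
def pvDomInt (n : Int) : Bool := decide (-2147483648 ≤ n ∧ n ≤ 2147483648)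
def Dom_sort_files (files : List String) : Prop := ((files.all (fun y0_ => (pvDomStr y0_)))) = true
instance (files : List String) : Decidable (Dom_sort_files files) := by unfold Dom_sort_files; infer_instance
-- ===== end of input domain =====

-- ===== PORT A =====
-- B sorts once and distributes items in a single if/elif pass; A partitions twice then sorts each bucket (alternative decomposition, same cost).
def sort_files (files : List String) : List String × List String :=
  let pre : List String := [];
  let post : List String := [];
  let pre := files.foldl (fun acc file => if PySem.Str.startswith file "pre" then acc ++ [file] else acc) pre;
  let post := files.foldl (fun acc file => if PySem.Str.startswith file "post" then acc ++ [file] else acc) post;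
  let pre := PySem.List.sorted pre (fun x => x) false;
  let post := PySem.List.sorted post (fun x => x) false;
  (pre, post)

-- ===== PORT B =====
def sort_files_alt (files : List String) : List String × List String :=
  (PySem.List.sorted files (fun x => x) false).foldl
    (fun (acc : List String × List String) f =>
      if PySem.Str.startswith f "pre" then (acc.1 ++ [f], acc.2)
      else if PySem.Str.startswith f "post" then (acc.1, acc.2 ++ [f])
      else acc)
    ([], [])

-- ===== PRECONDITION & SPEC =====
def Spec_sort_files (files : List String) (out : List String × List String) : Prop := out = sort_files_alt files
instance (files : List String) (out : List String × List String) : Decidable (Spec_sort_files files out) := by unfold Spec_sort_files; infer_instance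

-- ===== CLAIM (what is proved, stated in full; the proofs are below) =====
def Claim_equal_sort_files : Prop := ∀ (files : List String), Dom_sort_files files → Spec_sort_files files (sort_files files)

-- ===== LEMMAS AND PROOFS =====

-- "pre" and "post" are mutually exclusive prefixes
lemma pre_post_excl (f : String) (h : PySem.Str.startswith f "pre" = true) :
    PySem.Str.startswith f "post" = false := by
  by_contra hc
  have h2 : PySem.Str.startswith f "post" = true := by
    cases hp : PySem.Str.startswith f "post" with
    | true => rfl
    | false => exact absurd hp hc
  rw [PySem.Str.startswith_eq] at h h2
  have h1 := (PySem.Chars.startswith_iff _ _).mp h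
  have h3 := (PySem.Chars.startswith_iff _ _).mp h2
  rcases List.prefix_or_prefix_of_prefix h1 h3 with hp | hp <;> revert hp <;> decide

-- B's single pass accumulates the two filtered sublists of its input
lemma foldl_part (l : List String) (a b : List String) :
    l.foldl (fun (acc : List String × List String) f =>
      if PySem.Str.startswith f "pre" then (acc.1 ++ [f], acc.2)
      else if PySem.Str.startswith f "post" then (acc.1, acc.2 ++ [f])
      else acc) (a, b)
    = (a ++ l.filter (fun f => PySem.Str.startswith f "pre"),
       b ++ l.filter (fun f => PySem.Str.startswith f "post")) := by
  induction l generalizing a b with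
  | nil => simp
  | cons f t ih =>
    simp only [List.foldl_cons, List.filter_cons]
    by_cases hpre : PySem.Str.startswith f "pre" = true
    · simp only [hpre, pre_post_excl f hpre, if_true, Bool.false_eq_true, if_false, ih]
      simp
    · by_cases hpost : PySem.Str.startswith f "post" = true
      · simp only [hpre, hpost, Bool.false_eq_true, if_true, if_false, ih]
        simp
      · simp only [hpre, hpost, Bool.false_eq_true, if_false, ih]

-- sorting then filtering equals filtering then sorting (identity key)
lemma filter_sorted (p : String → Bool) (xs : List String) :
    PySem.List.sorted (xs.filter p) (fun x => x) false
      = (PySem.List.sorted xs (fun x => x) false).filter p := by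
  apply PySem.List.sorted_id_eq_of_perm_of_pairwise
  · exact (PySem.List.sorted_perm xs (fun x => x) false).filter p
  · exact (PySem.List.sorted_pairwise xs (fun x => x)).filter p

-- ===== VERDICT (by name: the statement is the Claim_ definition above) =====
theorem sort_files_spec : Claim_equal_sort_files := by
  intro files _
  unfold Spec_sort_files sort_files sort_files_alt
  rw [foldl_part]
  simp only [List.nil_append, PySem.List.foldl_append_if_eq_filter]
  rw [filter_sorted, filter_sorted]
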